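-- pv_equiv track=rewrite | github.com/Radom12/AI_Resume_Analyzer | app.py | recommend_field
-- ===== SOURCE A (Python) =====
-- def recommend_field(skills):
--     fields = {
--         "Data Science": ["Python", "Machine Learning", "Data Analysis", "SQL"],
--         "Web Development": ["JavaScript", "HTML", "CSS", "React", "Node.js"],
--         "Android Development": ["Java", "Kotlin", "Android SDK"],
--         "iOS Development": ["Swift", "Objective-C", "iOS SDK"],
--         "UI/UX Design": ["Figma", "Adobe XD", "Sketch", "User Research"]
--     }
--
--     max_match = 0
--     recommended_field = "General Software Development"
--
--     for field, field_skills in fields.items():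
--         match = len(set(skills) & set(field_skills))
--         if match > max_match:
--             max_match = match
--             recommended_field = field
--
--     return recommended_field
-- ===== SOURCE B (Python) =====
-- def recommend_field(skills):
--     fields = {
--         "Data Science": ["Python", "Machine Learning", "Data Analysis", "SQL"],
--         "Web Development": ["JavaScript", "HTML", "CSS", "React", "Node.js"],
--         "Android Development": ["Java", "Kotlin", "Android SDK"],
--         "iOS Development": ["Swift", "Objective-C", "iOS SDK"],
--         "UI/UX Design": ["Figma", "Adobe XD", "Sketch", "User Research"]
--     }
--
--     # inverted index: skill -> owning field (skills are unique across fields)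
--     index = {}
--     for field, field_skills in fields.items():
--         for s in field_skills:
--             index[s] = field
--
--     # one pass over the distinct skills
--     counts = {field: 0 for field in fields}
--     for s in set(skills):
--         f = index.get(s)
--         if f is not None:
--             counts[f] += 1
--
--     best_count = 0
--     best = "General Software Development"
--     for field in fields:
--         c = counts.get(field, 0)
--         if c > best_count:
--             best_count = c
--             best = field
--     return best
-- ===== Notes on version B (the rewrite author's own statement) =====
-- stated objective: idiomatic
-- what changed: Replaces A's per-field set-intersection loop (set(skills) rebuilt and intersected for every field) by an inverted skill-to-field index built once, a single counting pass over the distinct skills, and a final declaration-order max with strict '>'.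
import Mathlib
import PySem

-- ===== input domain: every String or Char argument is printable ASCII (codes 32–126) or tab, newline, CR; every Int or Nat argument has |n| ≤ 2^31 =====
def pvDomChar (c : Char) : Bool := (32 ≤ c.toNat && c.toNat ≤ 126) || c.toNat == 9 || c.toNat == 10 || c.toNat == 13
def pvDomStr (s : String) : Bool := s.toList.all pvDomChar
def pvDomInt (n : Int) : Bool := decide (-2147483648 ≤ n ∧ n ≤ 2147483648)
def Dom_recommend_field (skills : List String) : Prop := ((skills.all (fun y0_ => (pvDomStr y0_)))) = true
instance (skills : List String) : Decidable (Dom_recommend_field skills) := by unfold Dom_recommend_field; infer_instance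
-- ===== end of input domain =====

-- B replaces A's per-field set intersections by an inverted skill→field index and one counting
-- pass over the distinct skills (objective: alternative/idiomatic; same tie-break and default).

-- the static fields table (shared literal data, used by both ports)
def pvFields : List (String × List String) :=
  [("Data Science", ["Python", "Machine Learning", "Data Analysis", "SQL"]),
   ("Web Development", ["JavaScript", "HTML", "CSS", "React", "Node.js"]),
   ("Android Development", ["Java", "Kotlin", "Android SDK"]),
   ("iOS Development", ["Swift", "Objective-C", "iOS SDK"]),
   ("UI/UX Design", ["Figma", "Adobe XD", "Sketch", "User Research"])]

-- ===== PORT A =====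
-- for field, field_skills in fields.items(): match = len(set(skills) & set(field_skills)); strict-> update
def recommend_field (skills : List String) : String :=
  (pvFields.foldl
    (fun (st : Int × String) fp =>
      let m : Int := PySem.Set.len (PySem.Set.inter (PySem.Set.ofList skills) (PySem.Set.ofList fp.2))
      if m > st.1 then (m, fp.1) else st)
    (0, "General Software Development")).2

-- ===== PORT B =====
-- inverted index skill → field
def pvIndex : PySem.Dict String String :=
  pvFields.foldl (fun d fp => fp.2.foldl (fun d s => d.insert s fp.1) d) PySem.Dict.empty

-- counts initialised to 0 for every field
def pvCounts0 : PySem.Dict String Int :=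
  pvFields.foldl (fun d fp => d.insert fp.1 0) PySem.Dict.empty

-- one pass over the distinct skills, bumping the owning field's counter
def pvCounts (skills : List String) : PySem.Dict String Int :=
  (PySem.Set.ofList skills).foldl
    (fun c s =>
      match pvIndex.get? s with
      | some f => c.modify f 0 (· + 1)
      | none => c)
    pvCounts0

def recommend_field_alt (skills : List String) : String :=
  let counts := pvCounts skills
  (pvFields.foldl
    (fun (st : Int × String) fp =>
      let c : Int := counts.getD fp.1 0
      if c > st.1 then (c, fp.1) else st)
    (0, "General Software Development")).2

-- ===== PRECONDITION & SPEC =====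
def Spec_recommend_field (skills : List String) (out : String) : Prop := out = recommend_field_alt skills
instance (skills : List String) (out : String) : Decidable (Spec_recommend_field skills out) := by unfold Spec_recommend_field; infer_instance

-- ===== CLAIM (what is proved, stated in full; the proofs are below) =====
def Claim_equal_recommend_field : Prop := ∀ (skills : List String), Dom_recommend_field skills → Spec_recommend_field skills (recommend_field skills)

-- ===== LEMMAS AND PROOFS =====

-- the counting loop, characterised: each field's counter grows by a countP over the scanned skills
theorem pvCountLoop (ds : List String) (d : PySem.Dict String Int) (f : String) :
    (ds.foldl
      (fun c s =>
        match pvIndex.get? s with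
        | some fl => c.modify fl 0 (· + 1)
        | none => c) d).getD f 0 =
      d.getD f 0 + ((ds.countP (fun s => pvIndex.get? s == some f) : Int)) := by
  induction ds generalizing d with
  | nil => simp
  | cons s t ih =>
    simp only [List.foldl_cons, List.countP_cons]
    cases h : pvIndex.get? s with
    | none => simp [ih]
    | some fl =>
      rw [ih]
      by_cases hf : f = fl
      · subst hf
        simp [h]
        ring
      · simp [PySem.Dict.getD_modify, hf, Ne.symm hf]

theorem pvCounts_getD (skills : List String) (f : String) :
    (pvCounts skills).getD f 0 =
      pvCounts0.getD f 0 +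
        (((PySem.Set.ofList skills).countP (fun s => pvIndex.get? s == some f) : Int)) := by
  unfold pvCounts
  exact pvCountLoop _ _ _

theorem pvIndex_eq : pvIndex = { items := [("Python","Data Science"),("Machine Learning","Data Science"),("Data Analysis","Data Science"),("SQL","Data Science"),("JavaScript","Web Development"),("HTML","Web Development"),("CSS","Web Development"),("React","Web Development"),("Node.js","Web Development"),("Java","Android Development"),("Kotlin","Android Development"),("Android SDK","Android Development"),("Swift","iOS Development"),("Objective-C","iOS Development"),("iOS SDK","iOS Development"),("Figma","UI/UX Design"),("Adobe XD","UI/UX Design"),("Sketch","UI/UX Design"),("User Research","UI/UX Design")] } := by decide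

-- index lookup hits a field iff the skill is in that field's list
theorem pvIdx_DS (s : String) :
    (pvIndex.get? s == some "Data Science") = (["Python","Machine Learning","Data Analysis","SQL"] : List String).contains s := by
  rw [pvIndex_eq]
  simp only [PySem.Dict.get?, List.find?, List.contains]
  repeat' split
  all_goals try simp_all
  all_goals ((repeat' constructor) <;> (intro h; subst h; simp_all))

theorem pvIdx_WD (s : String) :
    (pvIndex.get? s == some "Web Development") = (["JavaScript","HTML","CSS","React","Node.js"] : List String).contains s := by
  rw [pvIndex_eq]
  simp only [PySem.Dict.get?, List.find?, List.contains]
  repeat' split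
  all_goals try simp_all
  all_goals ((repeat' constructor) <;> (intro h; subst h; simp_all))

theorem pvIdx_AD (s : String) :
    (pvIndex.get? s == some "Android Development") = (["Java","Kotlin","Android SDK"] : List String).contains s := by
  rw [pvIndex_eq]
  simp only [PySem.Dict.get?, List.find?, List.contains]
  repeat' split
  all_goals try simp_all
  all_goals ((repeat' constructor) <;> (intro h; subst h; simp_all))

theorem pvIdx_ID (s : String) :
    (pvIndex.get? s == some "iOS Development") = (["Swift","Objective-C","iOS SDK"] : List String).contains s := by
  rw [pvIndex_eq]
  simp only [PySem.Dict.get?, List.find?, List.contains]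
  repeat' split
  all_goals try simp_all
  all_goals ((repeat' constructor) <;> (intro h; subst h; simp_all))

theorem pvIdx_UX (s : String) :
    (pvIndex.get? s == some "UI/UX Design") = (["Figma","Adobe XD","Sketch","User Research"] : List String).contains s := by
  rw [pvIndex_eq]
  simp only [PySem.Dict.get?, List.find?, List.contains]
  repeat' split
  all_goals try simp_all
  all_goals ((repeat' constructor) <;> (intro h; subst h; simp_all))

-- A's per-field intersection size equals B's counter for that field
theorem pvMatch_eq (skills : List String) (f : String) (fs : List String)
    (hnd : fs.Nodup) (h0 : pvCounts0.getD f 0 = 0)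
    (hp : ∀ s : String, (pvIndex.get? s == some f) = fs.contains s) :
    PySem.Set.len (PySem.Set.inter (PySem.Set.ofList skills) (PySem.Set.ofList fs)) =
      (pvCounts skills).getD f 0 := by
  rw [pvCounts_getD, h0, zero_add]
  simp only [PySem.Set.inter, PySem.Set.len, PySem.Set.ofList_eq_self_of_nodup fs hnd]
  have : (fun s => pvIndex.get? s == some f) = (fun s => fs.contains s) := funext hp
  rw [this]
  simp [List.countP_eq_length_filter]

-- ===== VERDICT (by name: the statement is the Claim_ definition above) =====
theorem recommend_field_spec : Claim_equal_recommend_field := by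
  intro skills _
  unfold Spec_recommend_field recommend_field recommend_field_alt
  simp only [pvFields, List.foldl]
  rw [pvMatch_eq skills _ _ (by decide) (by decide) pvIdx_DS,
      pvMatch_eq skills _ _ (by decide) (by decide) pvIdx_WD,
      pvMatch_eq skills _ _ (by decide) (by decide) pvIdx_AD,
      pvMatch_eq skills _ _ (by decide) (by decide) pvIdx_ID,
      pvMatch_eq skills _ _ (by decide) (by decide) pvIdx_UX]
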